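-- pv_equiv track=rewrite | github.com/didiwool/Programming_Assignment | helper.py | find_extreme_item
-- ===== SOURCE A (Python) =====
-- def find_extreme_item(result):
--     """
--     Print the keys with maximum value and minimum value in dictionary.
--     """
--     if len(result.keys()) != 0:
--         max_item = ''
--         min_item = ''
--         max_value = max(result.values())
--         min_value = min(result.values())
--         for key in result.keys():
--             if result[key] == max_value:
--                 max_item = key
--             if result[key] == min_value:
--                 min_item = key
--         return (max_item, min_item)
--     else:
--         return('', '')
-- ===== SOURCE B (Python) =====
-- def find_extreme_item(result):
--     """
--     Return the keys with maximum value and minimum value in dictionary,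
--     in one pass over the items (last key wins on ties).
--     """
--     items = list(result.items())
--     if not items:
--         return ('', '')
--     max_item, max_value = items[0]
--     min_item, min_value = items[0]
--     for key, value in items[1:]:
--         if max_value <= value:
--             max_item, max_value = key, value
--         if value <= min_value:
--             min_item, min_value = key, value
--     return (max_item, min_item)
-- ===== Notes on version B (the rewrite author's own statement) =====
-- stated objective: alternative
-- what changed: Replaces A's three passes (max of values, min of values, then a key scan with per-key dict lookups) by a single pass over items() that maintains running max/min values and their last-seen keys, updating on >= / <= to keep the last key on ties.
import Mathlib
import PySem

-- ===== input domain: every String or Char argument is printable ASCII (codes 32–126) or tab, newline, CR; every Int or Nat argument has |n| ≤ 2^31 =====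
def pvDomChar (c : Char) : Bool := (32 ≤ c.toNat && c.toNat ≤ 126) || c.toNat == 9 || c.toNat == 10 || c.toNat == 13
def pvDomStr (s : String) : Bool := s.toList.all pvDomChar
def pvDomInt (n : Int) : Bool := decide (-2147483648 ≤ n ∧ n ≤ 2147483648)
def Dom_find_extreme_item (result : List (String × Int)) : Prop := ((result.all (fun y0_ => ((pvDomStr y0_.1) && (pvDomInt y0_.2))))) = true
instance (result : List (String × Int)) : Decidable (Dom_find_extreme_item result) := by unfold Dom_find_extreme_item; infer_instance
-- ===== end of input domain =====

-- B replaces A's three passes (max of values, min of values, then a key scan with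
-- dict lookups) by a single pass over items() keeping running max/min and their
-- last-seen keys; same return value, no side effects.

-- ===== PORT A =====
def find_extreme_item (result : List (String × Int)) : String × String :=
  let d := PySem.Dict.ofList result
  if d.keys.length ≠ 0 then
    match PySem.List.max? d.values (fun v => v), PySem.List.min? d.values (fun v => v) with
    | some max_value, some min_value =>
      d.keys.foldl (fun (p : String × String) key =>
        let p := if d.getD key 0 = max_value then (key, p.2) else p
        if d.getD key 0 = min_value then (p.1, key) else p) ("", "")
    | _, _ => ("", "")   -- unreachable: values is nonempty exactly when keys is
  else ("", "")

-- ===== PORT B =====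
def find_extreme_item_alt (result : List (String × Int)) : String × String :=
  match (PySem.Dict.ofList result).items with
  | [] => ("", "")
  | p :: rest =>
    let s := rest.foldl (fun (s : (String × Int) × (String × Int)) q =>
      let mx := if s.1.2 ≤ q.2 then q else s.1
      let mn := if q.2 ≤ s.2.2 then q else s.2
      (mx, mn)) (p, p)
    (s.1.1, s.2.1)

-- ===== PRECONDITION & SPEC =====
def Spec_find_extreme_item (result : List (String × Int)) (out : String × String) : Prop := out = find_extreme_item_alt result
instance (result : List (String × Int)) (out : String × String) : Decidable (Spec_find_extreme_item result out) := by unfold Spec_find_extreme_item; infer_instance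

-- ===== CLAIM (what is proved, stated in full; the proofs are below) =====
def Claim_equal_find_extreme_item : Prop := ∀ (result : List (String × Int)), Dom_find_extreme_item result → Spec_find_extreme_item result (find_extreme_item result)

-- ===== LEMMAS AND PROOFS =====

/-- `pvBest cmp a b`: keep `b` when `cmp a b`, else `a` (generic running extremum). -/
def pvBest (cmp : Int → Int → Bool) (a b : Int) : Int := if cmp a b then b else a

/-- Running extremum of the values of `l`, seeded with `c`. -/
def pvBestVal (cmp : Int → Int → Bool) (l : List (String × Int)) (c : Int) : Int :=
  l.foldl (fun a p => pvBest cmp a p.2) c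

/-- Last key of `l` whose value is `m`, defaulting to `d` (A's scan). -/
def pvLastKey (l : List (String × Int)) (m : Int) (d : String) : String :=
  l.foldl (fun a p => if p.2 = m then p.1 else a) d

lemma pvLastKey_cons (q : String × Int) (t : List (String × Int)) (m : Int) (a : String) :
    pvLastKey (q :: t) m a = pvLastKey t m (if q.2 = m then q.1 else a) := rfl

lemma pvBestVal_cons (cmp : Int → Int → Bool) (q : String × Int) (t : List (String × Int)) (c : Int) :
    pvBestVal cmp (q :: t) c = pvBestVal cmp t (pvBest cmp c q.2) := rfl

lemma pvLastKey_indep (l : List (String × Int)) (m : Int) (a b : String)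
    (h : ∃ p ∈ l, p.2 = m) : pvLastKey l m a = pvLastKey l m b := by
  induction l generalizing a b with
  | nil => obtain ⟨p, hp, _⟩ := h; cases hp
  | cons q t ih =>
    rw [pvLastKey_cons, pvLastKey_cons]
    by_cases hq : q.2 = m
    · rw [if_pos hq, if_pos hq]
    · rw [if_neg hq, if_neg hq]
      obtain ⟨p, hp, hpm⟩ := h
      rcases List.mem_cons.mp hp with hp | hp
      · exact absurd (hp ▸ hpm) hq
      · exact ih a b ⟨p, hp, hpm⟩

lemma pvBestVal_attained (cmp : Int → Int → Bool) (l : List (String × Int)) (c : Int) :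
    pvBestVal cmp l c = c ∨ ∃ p ∈ l, p.2 = pvBestVal cmp l c := by
  induction l generalizing c with
  | nil => exact Or.inl rfl
  | cons q t ih =>
    rw [pvBestVal_cons]
    rcases ih (pvBest cmp c q.2) with h | ⟨p, hp, hpm⟩
    · by_cases hc : cmp c q.2
      · exact Or.inr ⟨q, List.mem_cons_self, by rw [h]; simp [pvBest, hc]⟩
      · exact Or.inl (by rw [h]; simp [pvBest, hc])
    · exact Or.inr ⟨p, List.mem_cons_of_mem _ hp, hpm⟩

lemma pvBestVal_ge (cmp : Int → Int → Bool)
    (hrefl : ∀ a, cmp a a = true)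
    (htrans : ∀ a b c, cmp a b = true → cmp b c = true → cmp a c = true)
    (l : List (String × Int)) (c : Int) : cmp c (pvBestVal cmp l c) = true := by
  induction l generalizing c with
  | nil => exact hrefl c
  | cons q t ih =>
    rw [pvBestVal_cons]
    have h1 : cmp c (pvBest cmp c q.2) = true := by
      by_cases hc : cmp c q.2 <;> simp [pvBest, hc, hrefl]
    exact htrans _ _ _ h1 (ih (pvBest cmp c q.2))

/-- B's running-extremum loop computes (last key attaining the extremum, the extremum). -/
lemma pvLoop_invariant (cmp : Int → Int → Bool)
    (hrefl : ∀ a, cmp a a = true)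
    (htrans : ∀ a b c, cmp a b = true → cmp b c = true → cmp a c = true)
    (rest : List (String × Int)) (mk : String) (mv : Int) :
    rest.foldl (fun (s : String × Int) q => if cmp s.2 q.2 then q else s) (mk, mv)
      = (pvLastKey rest (pvBestVal cmp rest mv) mk, pvBestVal cmp rest mv) := by
  induction rest generalizing mk mv with
  | nil => simp [pvLastKey, pvBestVal]
  | cons q t ih =>
    rw [List.foldl_cons, pvBestVal_cons, pvLastKey_cons]
    by_cases hc : cmp mv q.2
    · have hb : pvBest cmp mv q.2 = q.2 := by simp [pvBest, hc]
      rw [if_pos hc, ih q.1 q.2, hb]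
      by_cases hq : q.2 = pvBestVal cmp t q.2
      · rw [if_pos hq]
      · rw [if_neg hq]
        rcases pvBestVal_attained cmp t q.2 with h | h
        · exact absurd h.symm hq
        · rw [pvLastKey_indep t _ q.1 mk h]
    · have hb : pvBest cmp mv q.2 = mv := by simp [pvBest, hc]
      rw [if_neg hc, ih mk mv, hb]
      have hne : q.2 ≠ pvBestVal cmp t mv := by
        intro he
        have := pvBestVal_ge cmp hrefl htrans t mv
        rw [← he] at this
        exact hc this
      rw [if_neg hne]

lemma max?_cons (vs : List Int) (v : Int) :
    PySem.List.max? (v :: vs) (fun x => x)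
      = some (vs.foldl (fun a x => pvBest (fun a b => decide (a ≤ b)) a x) v) := by
  induction vs generalizing v with
  | nil => rfl
  | cons w t ih =>
    have h1 : PySem.List.max? (v :: w :: t) (fun x => x)
        = PySem.List.max? ((if v < w then w else v) :: t) (fun x => x) := by
      by_cases h : v < w <;> simp [PySem.List.max?, h]
    have h2 : (if v < w then w else v) = pvBest (fun a b => decide (a ≤ b)) v w := by
      simp only [pvBest, decide_eq_true_eq]; split_ifs <;> omega
    rw [h1, h2, ih, List.foldl_cons]

lemma min?_cons (vs : List Int) (v : Int) :
    PySem.List.min? (v :: vs) (fun x => x)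
      = some (vs.foldl (fun a x => pvBest (fun a b => decide (b ≤ a)) a x) v) := by
  induction vs generalizing v with
  | nil => rfl
  | cons w t ih =>
    have h1 : PySem.List.min? (v :: w :: t) (fun x => x)
        = PySem.List.min? ((if w < v then w else v) :: t) (fun x => x) := by
      by_cases h : w < v <;> simp [PySem.List.min?, h]
    have h2 : (if w < v then w else v) = pvBest (fun a b => decide (b ≤ a)) v w := by
      simp only [pvBest, decide_eq_true_eq]; split_ifs <;> omega
    rw [h1, h2, ih, List.foldl_cons]

lemma pvBestVal_map_snd (cmp : Int → Int → Bool) (l : List (String × Int)) (c : Int) :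
    (l.map (·.2)).foldl (fun a x => pvBest cmp a x) c = pvBestVal cmp l c := by
  rw [List.foldl_map]; rfl

/-- A's key scan, rewritten over the items list once each lookup is resolved. -/
lemma pvA_scan (d : PySem.Dict String Int) (M N : Int) (l : List (String × Int))
    (hl : ∀ q ∈ l, d.getD q.1 0 = q.2) (acc : String × String) :
    (l.map (·.1)).foldl (fun (p : String × String) key =>
        let p := if d.getD key 0 = M then (key, p.2) else p
        if d.getD key 0 = N then (p.1, key) else p) acc
      = (pvLastKey l M acc.1, pvLastKey l N acc.2) := by
  induction l generalizing acc with
  | nil => rfl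
  | cons q t ih =>
    simp only [List.map_cons, List.foldl_cons, pvLastKey_cons]
    rw [hl q List.mem_cons_self]
    rw [ih (fun r hr => hl r (List.mem_cons_of_mem _ hr))]
    congr 1 <;> split_ifs <;> rfl

-- ===== VERDICT (by name: the statement is the Claim_ definition above) =====
theorem find_extreme_item_spec : Claim_equal_find_extreme_item := by
  intro result _
  show find_extreme_item result = find_extreme_item_alt result
  simp only [find_extreme_item, find_extreme_item_alt]
  set d := PySem.Dict.ofList result with hd
  have hnd : d.keys.Nodup := PySem.Dict.nodup_keys_ofList result
  cases hitems : d.items with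
  | nil =>
    have hk : ¬ d.keys.length ≠ 0 := by simp [PySem.Dict.keys, hitems]
    rw [if_neg hk]
  | cons p rest =>
    obtain ⟨pk, pv⟩ := p
    have hk : d.keys.length ≠ 0 := by simp [PySem.Dict.keys, hitems]
    rw [if_pos hk]
    have hvals : d.values = pv :: rest.map (·.2) := by simp [PySem.Dict.values, hitems]
    have hmax : PySem.List.max? d.values (fun v => v)
        = some (pvBestVal (fun a b => decide (a ≤ b)) rest pv) := by
      rw [hvals, max?_cons, pvBestVal_map_snd]
    have hmin : PySem.List.min? d.values (fun v => v)
        = some (pvBestVal (fun a b => decide (b ≤ a)) rest pv) := by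
      rw [hvals, min?_cons, pvBestVal_map_snd]
    rw [hmax, hmin]
    set M := pvBestVal (fun a b => decide (a ≤ b)) rest pv with hM
    set N := pvBestVal (fun a b => decide (b ≤ a)) rest pv with hN
    -- A's key loop, resolved over the items
    have hkeys : d.keys = ((pk, pv) :: rest).map (·.1) := by simp [PySem.Dict.keys, hitems]
    have hl : ∀ q ∈ (pk, pv) :: rest, d.getD q.1 0 = q.2 := by
      intro q hq
      exact PySem.Dict.getD_of_mem_items d (by rw [hitems]; exact hq) hnd 0
    rw [hkeys]
    show ((pk, pv) :: rest |>.map (·.1)).foldl (fun (p : String × String) key =>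
        let p := if d.getD key 0 = M then (key, p.2) else p
        if d.getD key 0 = N then (p.1, key) else p) ("", "") = _
    rw [pvA_scan d M N _ hl ("", "")]
    -- B's loop, split into the max loop and the min loop
    have hsplit : rest.foldl (fun (s : (String × Int) × (String × Int)) q =>
        ((if s.1.2 ≤ q.2 then q else s.1), (if q.2 ≤ s.2.2 then q else s.2))) ((pk, pv), (pk, pv))
        = (rest.foldl (fun (s : String × Int) q => if s.2 ≤ q.2 then q else s) (pk, pv),
           rest.foldl (fun (s : String × Int) q => if q.2 ≤ s.2 then q else s) (pk, pv)) := by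
      rw [PySem.List.foldl_prod_mk (f := fun (s : String × Int) q => if s.2 ≤ q.2 then q else s)
        (g := fun (s : String × Int) q => if q.2 ≤ s.2 then q else s)]
    show _ = ((rest.foldl (fun (s : (String × Int) × (String × Int)) q =>
        ((if s.1.2 ≤ q.2 then q else s.1), (if q.2 ≤ s.2.2 then q else s.2))) ((pk, pv), (pk, pv))).1.1,
      (rest.foldl (fun (s : (String × Int) × (String × Int)) q =>
        ((if s.1.2 ≤ q.2 then q else s.1), (if q.2 ≤ s.2.2 then q else s.2))) ((pk, pv), (pk, pv))).2.1)
    rw [hsplit]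
    have htrans1 : ∀ a b c : Int, decide (a ≤ b) = true → decide (b ≤ c) = true → decide (a ≤ c) = true := by
      intro a b c h1 h2; simp at *; omega
    have htrans2 : ∀ a b c : Int, decide (b ≤ a) = true → decide (c ≤ b) = true → decide (c ≤ a) = true := by
      intro a b c h1 h2; simp at *; omega
    have hBmax := pvLoop_invariant (fun a b => decide (a ≤ b)) (by simp) htrans1 rest pk pv
    have hBmin := pvLoop_invariant (fun a b => decide (b ≤ a)) (by simp) htrans2 rest pk pv
    simp only [decide_eq_true_eq] at hBmax hBmin
    rw [hBmax, hBmin, ← hM, ← hN]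
    -- A's scans are seeded with "", B's with the head key; the head is handled here
    rw [pvLastKey_cons, pvLastKey_cons]
    congr 1
    · by_cases h1 : (pk, pv).2 = M
      · rw [if_pos h1]
      · rw [if_neg h1]
        rcases pvBestVal_attained (fun a b => decide (a ≤ b)) rest pv with h | h
        · exact absurd (h.symm.trans rfl) h1
        · exact pvLastKey_indep rest M "" pk h
    · by_cases h2 : (pk, pv).2 = N
      · rw [if_pos h2]
      · rw [if_neg h2]
        rcases pvBestVal_attained (fun a b => decide (b ≤ a)) rest pv with h | h
        · exact absurd (h.symm.trans rfl) h2
        · exact pvLastKey_indep rest N "" pk h
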